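-- pv_equiv track=rewrite | github.com/hyperpolymath/proven | bindings/micropython/proven.py | is_safe_filename
-- ===== SOURCE A (Python) =====
-- def is_safe_filename(name, max_len=64):
--     """Check if filename is safe for embedded filesystem."""
--     if len(name) > max_len:
--         return False
--     unsafe = '<>:"/\\|?*\x00'
--     for c in name:
--         if c in unsafe or ord(c) < 32:
--             return False
--     return True
-- ===== SOURCE B (Python) =====
-- import re
--
-- _UNSAFE_RE = re.compile(r'[<>:"/\\|?*\x00-\x1f]')
--
-- def is_safe_filename(name, max_len=64):
--     """Check if filename is safe for embedded filesystem."""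
--     if len(name) > max_len:
--         return False
--     return _UNSAFE_RE.search(name) is None
-- ===== Notes on version B (the rewrite author's own statement) =====
-- stated objective: idiomatic
-- what changed: Replaces the explicit per-character loop with its two-part test (membership in an unsafe-literal string, ord(c) < 32) by a single precompiled regex search over one character class covering both the unsafe literals and the whole \x00-\x1f control range.
import Mathlib
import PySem

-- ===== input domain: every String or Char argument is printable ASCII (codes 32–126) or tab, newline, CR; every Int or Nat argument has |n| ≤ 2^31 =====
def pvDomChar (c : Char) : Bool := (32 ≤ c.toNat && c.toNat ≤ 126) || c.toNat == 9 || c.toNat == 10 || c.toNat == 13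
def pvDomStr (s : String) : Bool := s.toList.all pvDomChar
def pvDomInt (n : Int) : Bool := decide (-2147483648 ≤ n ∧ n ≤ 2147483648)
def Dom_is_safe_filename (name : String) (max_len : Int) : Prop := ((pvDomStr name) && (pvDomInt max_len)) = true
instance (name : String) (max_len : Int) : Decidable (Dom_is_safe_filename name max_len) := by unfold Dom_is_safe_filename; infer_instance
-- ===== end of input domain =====

-- B replaces A's per-character loop (membership in an unsafe string or ord < 32) by one
-- regex-style scan against the single character class [<>:"/\\|?*\x00-\x1f]; objective: idiomatic.

-- ===== PORT A =====
def pvLoopA : List Char → Bool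
  | [] => true
  | c :: rest =>
      if ("<>:\"/\\|?*\x00".toList.contains c) || (c.toNat < 32) then false
      else pvLoopA rest

def is_safe_filename (name : String) (max_len : Int) : Bool :=
  if PySem.Str.len name > max_len then false
  else pvLoopA name.toList

-- ===== PORT B =====
-- the character class [<>:"/\\|?*\x00-\x1f]: a char matches iff it is one of the literals
-- or its code lies in 0..31 (exact port of the regex class; re.search finds a match iff some char matches)
def pvClassB (c : Char) : Bool :=
  ("<>:\"/\\|?*".toList.contains c) || (c.toNat ≤ 31)

def is_safe_filename_alt (name : String) (max_len : Int) : Bool :=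
  if PySem.Str.len name > max_len then false
  else !(name.toList.any pvClassB)


-- ===== PRECONDITION & SPEC =====
def Spec_is_safe_filename (name : String) (max_len : Int) (out : Bool) : Prop := out = is_safe_filename_alt name max_len
instance (name : String) (max_len : Int) (out : Bool) : Decidable (Spec_is_safe_filename name max_len out) := by unfold Spec_is_safe_filename; infer_instance

-- ===== CLAIM (what is proved, stated in full; the proofs are below) =====
def Claim_equal_is_safe_filename : Prop := ∀ (name : String) (max_len : Int), Dom_is_safe_filename name max_len → Spec_is_safe_filename name max_len (is_safe_filename name max_len)

-- ===== LEMMAS AND PROOFS =====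
set_option maxRecDepth 4096 in
lemma predA_eq_classB (c : Char) :
    (("<>:\"/\\|?*\x00".toList.contains c) || decide (c.toNat < 32)) = pvClassB c := by
  unfold pvClassB
  by_cases hc : c = '\x00'
  · subst hc
    decide
  · have h31 : decide (c.toNat < 32) = decide (c.toNat ≤ 31) := decide_eq_decide.mpr (by omega)
    have h0 : (c == '\x00') = false := beq_eq_false_iff_ne.mpr hc
    rw [show ("<>:\"/\\|?*\x00".toList) = ['<','>',':','\"','/','\\','|','?','*','\x00'] from rfl,
        show ("<>:\"/\\|?*".toList) = ['<','>',':','\"','/','\\','|','?','*'] from rfl]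
    simp only [List.contains_cons, List.contains_nil, h0, Bool.or_false, h31]

lemma loopA_eq_any (cs : List Char) : pvLoopA cs = !(cs.any pvClassB) := by
  induction cs with
  | nil => rfl
  | cons c rest ih =>
      rw [List.any_cons, ← predA_eq_classB c]
      unfold pvLoopA
      by_cases h : (("<>:\"/\\|?*\x00".toList.contains c) || decide (c.toNat < 32)) = true
      · rw [if_pos h, h, Bool.true_or, Bool.not_true]
      · have hb := eq_false_of_ne_true h
        rw [if_neg h, hb, Bool.false_or, ih]

-- ===== VERDICT (by name: the statement is the Claim_ definition above) =====
theorem is_safe_filename_spec : Claim_equal_is_safe_filename := by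
  intro name max_len _
  unfold Spec_is_safe_filename is_safe_filename is_safe_filename_alt
  rw [loopA_eq_any]
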